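-- pv_equiv track=rewrite | github.com/pypi-data/pypi-mirror-398 | packages/plexmix/plexmix-0.2.11-py3-none-any.whl/plexmix/ui/utils/validation.py | validate_search_query
-- ===== SOURCE A (Python) =====
-- from typing import Optional, Tuple
--
-- def validate_search_query(query: str) -> Tuple[bool, Optional[str]]:
--     """
--     Validate search query input.
--     Returns (is_valid, error_message)
--     """
--     if len(query) > 500:
--         return False, "Search query is too long (max 500 characters)"
--
--     # Check for potential SQL injection patterns
--     dangerous_patterns = [';', '--', '/*', '*/', 'DROP', 'DELETE', 'INSERT', 'UPDATE']
--     query_upper = query.upper()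
--     for pattern in dangerous_patterns:
--         if pattern in query_upper:
--             return False, "Search query contains invalid characters"
--
--     return True, None
-- ===== SOURCE B (Python) =====
-- _DANGEROUS = (';', '--', '/*', '*/', 'DROP', 'DELETE', 'INSERT', 'UPDATE')
--
--
-- def validate_search_query(query):
--     if len(query) > 500:
--         return False, "Search query is too long (max 500 characters)"
--     u = query.upper()
--     for i in range(len(u)):
--         if any(u.startswith(p, i) for p in _DANGEROUS):
--             return False, "Search query contains invalid characters"
--     return True, None
-- ===== Notes on version B (the rewrite author's own statement) =====
-- stated objective: alternative
-- what changed: Instead of A's pattern-major loop of eight independent substring-containment scans over the uppercased query, B makes a single position-major pass over the query, checking at each position whether any dangerous pattern starts there.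
import Mathlib
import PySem

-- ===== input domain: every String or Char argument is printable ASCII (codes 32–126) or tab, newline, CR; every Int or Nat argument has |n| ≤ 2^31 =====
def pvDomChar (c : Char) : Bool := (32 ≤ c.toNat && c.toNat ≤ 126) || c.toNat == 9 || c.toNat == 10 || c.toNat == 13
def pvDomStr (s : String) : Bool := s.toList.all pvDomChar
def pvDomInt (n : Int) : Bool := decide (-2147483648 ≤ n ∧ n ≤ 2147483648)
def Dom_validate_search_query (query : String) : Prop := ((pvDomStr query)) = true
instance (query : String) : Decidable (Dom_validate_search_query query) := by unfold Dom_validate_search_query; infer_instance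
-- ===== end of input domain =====

-- B replaces A's pattern-major loop of eight substring scans by one position-major pass
-- that checks, at each position, whether any dangerous pattern starts there (alternative
-- decomposition, same messages and results).

-- ===== PORT A =====
def pvPats : List String := [";", "--", "/*", "*/", "DROP", "DELETE", "INSERT", "UPDATE"]

-- A's 'for pattern in dangerous_patterns: if pattern in query_upper: return …'
def pvLoopA : List String → String → Bool × Option String
  | [], _ => (true, none)
  | p :: rest, u =>
    if PySem.Str.isIn p u then (false, some "Search query contains invalid characters")
    else pvLoopA rest u

def validate_search_query (query : String) : Bool × Option String :=
  if PySem.Str.len query > 500 then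
    (false, some "Search query is too long (max 500 characters)")
  else
    pvLoopA pvPats (PySem.Str.upper query)

-- ===== PORT B =====
-- B's module constant _DANGEROUS
def pvDangerous : List String := [";", "--", "/*", "*/", "DROP", "DELETE", "INSERT", "UPDATE"]

-- B's 'any(u.startswith(p, i) for p in _DANGEROUS)' at one position i
def pvHitAt (cs : List Char) : Bool :=
  pvDangerous.any (fun p => PySem.Chars.startswith cs p.toList)

-- B's 'for i in range(len(u)): …' — one pass over the suffixes of u
def pvScan : List Char → Bool
  | [] => false
  | c :: rest => pvHitAt (c :: rest) || pvScan rest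

def validate_search_query_alt (query : String) : Bool × Option String :=
  if PySem.Str.len query > 500 then
    (false, some "Search query is too long (max 500 characters)")
  else if pvScan (PySem.Str.upper query).toList then
    (false, some "Search query contains invalid characters")
  else
    (true, none)

-- ===== PRECONDITION & SPEC =====
def Spec_validate_search_query (query : String) (out : Bool × Option String) : Prop := out = validate_search_query_alt query
instance (query : String) (out : Bool × Option String) : Decidable (Spec_validate_search_query query out) := by unfold Spec_validate_search_query; infer_instance

-- ===== CLAIM (what is proved, stated in full; the proofs are below) =====
def Claim_equal_validate_search_query : Prop := ∀ (query : String), Dom_validate_search_query query → Spec_validate_search_query query (validate_search_query query)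

-- ===== LEMMAS AND PROOFS =====

lemma pvPats_ne_nil : ∀ p ∈ pvPats, p.toList ≠ [] := by decide

lemma pvDangerous_eq : pvDangerous = pvPats := rfl

lemma pvScan_iff (cs : List Char) :
    pvScan cs = true ↔ ∃ p ∈ pvPats, ∃ j, p.toList <+: cs.drop j := by
  induction cs with
  | nil =>
    simp only [pvScan]
    constructor
    · intro h; exact absurd h (by simp)
    · rintro ⟨p, hp, j, hpre⟩
      simp only [List.drop_nil] at hpre
      exact absurd (List.prefix_nil.mp hpre) (pvPats_ne_nil p hp)
  | cons c rest ih =>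
    simp only [pvScan, Bool.or_eq_true, ih, pvHitAt, pvDangerous_eq, List.any_eq_true]
    constructor
    · rintro (⟨p, hp, hsw⟩ | ⟨p, hp, j, hpre⟩)
      · exact ⟨p, hp, 0, by simpa using (PySem.Chars.startswith_iff _ _).mp hsw⟩
      · exact ⟨p, hp, j + 1, by simpa using hpre⟩
    · rintro ⟨p, hp, j, hpre⟩
      cases j with
      | zero =>
        exact Or.inl ⟨p, hp, (PySem.Chars.startswith_iff _ _).mpr (by simpa using hpre)⟩
      | succ j =>
        exact Or.inr ⟨p, hp, j, by simpa using hpre⟩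

lemma pvScan_eq_any (u : String) :
    pvScan u.toList = pvPats.any (fun p => PySem.Str.isIn p u) := by
  have h : pvScan u.toList = true ↔ pvPats.any (fun p => PySem.Str.isIn p u) = true := by
    rw [pvScan_iff, List.any_eq_true]
    constructor
    · rintro ⟨p, hp, j, hpre⟩
      refine ⟨p, hp, ?_⟩
      simp only [PySem.Str.isIn_eq]
      exact (PySem.Chars.exists_prefix_drop_iff_isIn _ _).mp ⟨j, hpre⟩
    · rintro ⟨p, hp, hin⟩
      simp only [PySem.Str.isIn_eq] at hin
      obtain ⟨j, hj⟩ := (PySem.Chars.exists_prefix_drop_iff_isIn _ _).mpr hin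
      exact ⟨p, hp, j, hj⟩
  exact Bool.coe_iff_coe.mp h

lemma pvLoopA_eq (l : List String) (u : String) :
    pvLoopA l u =
      if l.any (fun p => PySem.Str.isIn p u) then
        (false, some "Search query contains invalid characters")
      else (true, none) := by
  induction l with
  | nil => simp [pvLoopA]
  | cons p rest ih =>
    cases h : PySem.Chars.isIn p.toList u.toList with
    | true => simp [pvLoopA, h]
    | false => simp [pvLoopA, h, ih]

-- ===== VERDICT (by name: the statement is the Claim_ definition above) =====
theorem validate_search_query_spec : Claim_equal_validate_search_query := by
  intro query _
  unfold Spec_validate_search_query validate_search_query validate_search_query_alt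
  by_cases hlen : PySem.Str.len query > 500
  · rw [if_pos hlen, if_pos hlen]
  · rw [if_neg hlen, if_neg hlen, pvLoopA_eq, pvScan_eq_any]
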